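-- pv_equiv track=rewrite | github.com/kvg20022020-a11y/Laba3 | riven2zada4a4.py | reverse_sequence_from_string
-- ===== SOURCE A (Python) =====
-- from typing import List, Callable
--
-- def reverse_sequence_from_string(input_str: str) -> List[int]:
--     """Parse a string of space-separated numbers and return in reverse.
--
--     Numbers should be separated by spaces. Reading stops at 0.
--
--     Args:
--         input_str: String like "5 3 7 2 0"
--
--     Returns:
--         List[int]: Sequence in reverse order (excluding 0)
--     """
--     numbers = []
--
--     for token in input_str.split():
--         try:
--             num = int(token)
--             if num == 0:
--                 break
--             numbers.append(num)
--         except ValueError: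
--             continue
--
--     return numbers[::-1]
-- ===== SOURCE B (Python) =====
-- from typing import List
--
-- def _cut_index(tokens: List[str]) -> int:
--     """Index of the first token that parses as the integer 0, else len(tokens)."""
--     for i, t in enumerate(tokens):
--         try:
--             if int(t) == 0:
--                 return i
--         except ValueError:
--             pass
--     return len(tokens)
--
-- def reverse_sequence_from_string(input_str: str) -> List[int]:
--     tokens = input_str.split()
--     out = []
--     # walk the relevant prefix back-to-front, producing the result directly
--     # in its final (reversed) order -- no reversal step needed
--     for t in reversed(tokens[:_cut_index(tokens)]):
--         try:
--             out.append(int(t))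
--         except ValueError:
--             pass
--     return out
-- ===== Notes on version B (the rewrite author's own statement) =====
-- stated objective: alternative
-- what changed: Instead of one forward loop that parses, breaks at zero, appends and finally reverses, B first scans only for the cut position (first token parsing to 0), then walks that prefix back-to-front building the output directly in final order with no reversal step.
import Mathlib
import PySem

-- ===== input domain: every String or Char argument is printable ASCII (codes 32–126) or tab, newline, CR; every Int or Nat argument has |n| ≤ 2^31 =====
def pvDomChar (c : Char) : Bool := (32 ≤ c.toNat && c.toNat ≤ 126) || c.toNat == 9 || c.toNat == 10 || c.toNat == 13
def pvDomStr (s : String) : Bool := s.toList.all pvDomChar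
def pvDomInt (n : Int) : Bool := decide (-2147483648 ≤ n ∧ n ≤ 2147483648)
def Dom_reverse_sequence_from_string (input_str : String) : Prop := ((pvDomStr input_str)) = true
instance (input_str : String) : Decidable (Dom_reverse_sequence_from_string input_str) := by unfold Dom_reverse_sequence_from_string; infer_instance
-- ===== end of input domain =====

-- B replaces A's single forward parse/break/append-then-reverse loop by: find the cut
-- position (first token parsing to 0), then walk that prefix back-to-front building the
-- output directly in final order (no reversal step). Objective: alternative, same cost.

-- ===== PORT A =====
-- A's for-loop with try/except and break, as structural recursion on the token list
-- carrying the accumulator `numbers`.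
def pvLoopA : List String → List Int → List Int
  | [], numbers => numbers
  | t :: ts, numbers =>
    match PySem.Int.ofStr? t with
    | none => pvLoopA ts numbers              -- except ValueError: continue
    | some num =>
      if num == 0 then numbers                -- break
      else pvLoopA ts (numbers ++ [num])      -- numbers.append(num)

def reverse_sequence_from_string (input_str : String) : List Int :=
  -- numbers[::-1]: slice? … (-1) = some of the reverse (slice?_none_none_neg_one)
  (PySem.List.slice? (pvLoopA (PySem.Str.split₀ input_str) []) none none (-1)).getD []

-- ===== PORT B =====
-- _cut_index: index of the first token parsing as 0, else the list length.
def pvCutIndex : List String → Nat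
  | [] => 0
  | t :: ts =>
    match PySem.Int.ofStr? t with
    | some 0 => 0
    | _ => pvCutIndex ts + 1

-- the back-to-front build loop: append successfully parsed ints to `out`.
def pvBuildB : List String → List Int → List Int
  | [], out => out
  | t :: ts, out =>
    match PySem.Int.ofStr? t with
    | none => pvBuildB ts out
    | some n => pvBuildB ts (out ++ [n])

def reverse_sequence_from_string_alt (input_str : String) : List Int :=
  let tokens := PySem.Str.split₀ input_str
  pvBuildB ((tokens.take (pvCutIndex tokens)).reverse) []

-- ===== PRECONDITION & SPEC =====
def Spec_reverse_sequence_from_string (input_str : String) (out : List Int) : Prop := out = reverse_sequence_from_string_alt input_str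
instance (input_str : String) (out : List Int) : Decidable (Spec_reverse_sequence_from_string input_str out) := by unfold Spec_reverse_sequence_from_string; infer_instance

-- ===== CLAIM (what is proved, stated in full; the proofs are below) =====
def Claim_equal_reverse_sequence_from_string : Prop := ∀ (input_str : String), Dom_reverse_sequence_from_string input_str → Spec_reverse_sequence_from_string input_str (reverse_sequence_from_string input_str)

-- ===== LEMMAS AND PROOFS =====

-- A's loop computes acc ++ takeWhile (≠ 0) of the successfully parsed tokens.
theorem pvLoopA_eq (ts : List String) (acc : List Int) :
    pvLoopA ts acc = acc ++ ((ts.filterMap PySem.Int.ofStr?).takeWhile (fun n => n != 0)) := by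
  induction ts generalizing acc with
  | nil => simp [pvLoopA]
  | cons t ts ih =>
    simp only [pvLoopA, List.filterMap_cons]
    cases h : PySem.Int.ofStr? t with
    | none => simpa using ih acc
    | some num =>
      by_cases h0 : num = 0
      · subst h0; simp
      · simp [h0, ih (acc ++ [num])]

-- B's build loop computes acc ++ the successfully parsed tokens.
theorem pvBuildB_eq (ts : List String) (acc : List Int) :
    pvBuildB ts acc = acc ++ ts.filterMap PySem.Int.ofStr? := by
  induction ts generalizing acc with
  | nil => simp [pvBuildB]
  | cons t ts ih =>
    simp only [pvBuildB, List.filterMap_cons]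
    cases h : PySem.Int.ofStr? t with
    | none => simpa using ih acc
    | some n => simp [ih (acc ++ [n])]

-- parsing the prefix before the cut = takeWhile (≠ 0) of all parses.
theorem take_cut_eq (ts : List String) :
    (ts.take (pvCutIndex ts)).filterMap PySem.Int.ofStr?
      = (ts.filterMap PySem.Int.ofStr?).takeWhile (fun n => n != 0) := by
  induction ts with
  | nil => simp
  | cons t ts ih =>
    simp only [pvCutIndex]
    cases h : PySem.Int.ofStr? t with
    | none => simp [h, ih]
    | some n =>
      by_cases h0 : n = 0
      · subst h0; simp [h]
      · have : (match some n with | some 0 => 0 | _ => pvCutIndex ts + 1) = pvCutIndex ts + 1 := by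
          cases n with
          | ofNat m => cases m with
            | zero => exact absurd rfl h0
            | succ k => rfl
          | negSucc m => rfl
        rw [this]; simp [h, h0, ih]

-- ===== VERDICT (by name: the statement is the Claim_ definition above) =====
theorem reverse_sequence_from_string_spec : Claim_equal_reverse_sequence_from_string := by
  intro s _
  unfold Spec_reverse_sequence_from_string reverse_sequence_from_string reverse_sequence_from_string_alt
  rw [pvLoopA_eq, PySem.List.slice?_none_none_neg_one]
  simp [pvBuildB_eq, List.filterMap_reverse, take_cut_eq]
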